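-- pv_equiv track=rewrite | github.com/ayoubarich-dev/Compressed_Audio | support.py | LZ78_decode
-- ===== SOURCE A (Python) =====
-- def LZ78_decode(code):
--     rev_dico = {}
--     re_sequence = []
--     for i,c in enumerate(code):
--         if c[0] == 0:
--             rev_dico[i+1] = c[1]
--             re_sequence.append(c[1])
--         else :
--             re_sequence.append(rev_dico[c[0]] + c[1])
--             rev_dico[i+1] = rev_dico[c[0]] + c[1]
--     return re_sequence
-- ===== SOURCE B (Python) =====
-- def LZ78_decode(code):
--     # Parent-pointer decoding: entry i+1 is (parent index, char) = code[i];
--     # each phrase is reconstructed by walking the parent chain back to root 0.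
--     re_sequence = []
--     for i in range(len(code)):
--         chars = []
--         j = i + 1
--         while j != 0:
--             p, ch = code[j - 1]
--             chars.append(ch)
--             j = p
--         re_sequence.append(''.join(reversed(chars)))
--     return re_sequence
-- ===== Notes on version B (the rewrite author's own statement) =====
-- stated objective: alternative
-- what changed: Replaces the dictionary of fully concatenated phrase strings with parent-pointer reconstruction: each output string is rebuilt by walking the (parent index, char) chain in the code itself back to root 0 and joining the collected chars in reverse.
import Mathlib
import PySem

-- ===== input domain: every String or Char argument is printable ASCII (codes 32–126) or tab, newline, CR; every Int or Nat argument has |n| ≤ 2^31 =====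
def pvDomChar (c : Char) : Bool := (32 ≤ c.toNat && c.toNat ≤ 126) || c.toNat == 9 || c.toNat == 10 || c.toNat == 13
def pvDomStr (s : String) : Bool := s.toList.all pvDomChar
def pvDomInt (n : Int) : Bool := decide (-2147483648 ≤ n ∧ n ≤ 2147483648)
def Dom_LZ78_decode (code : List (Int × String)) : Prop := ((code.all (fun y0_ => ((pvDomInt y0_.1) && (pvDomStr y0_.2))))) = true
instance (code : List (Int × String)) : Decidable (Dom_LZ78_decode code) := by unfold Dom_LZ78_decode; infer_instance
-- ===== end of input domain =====

-- B rebuilds each phrase by walking the (parent, char) chain instead of keeping a dict of full strings.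

-- ===== PORT A =====
-- one loop step of A: dict update + append (rev_dico lookup via get?/getD ""; Pre_ guarantees the key is present)
def pvStepA (st : PySem.Dict Int String × List String) (ic : Int × (Int × String)) :
    PySem.Dict Int String × List String :=
  if ic.2.1 = 0 then
    (st.1.insert (ic.1 + 1) ic.2.2, st.2 ++ [ic.2.2])
  else
    let s := (st.1.get? ic.2.1).getD "" ++ ic.2.2
    (st.1.insert (ic.1 + 1) s, st.2 ++ [s])

def LZ78_decode (code : List (Int × String)) : List String :=
  ((PySem.List.enumerate code 0).foldl pvStepA (PySem.Dict.mk [], [])).2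

-- ===== PORT B =====
-- the while loop of B: collect chars following the parent chain; the fuel 2*len+2 covers every terminating chain (a terminating walk never revisits a j, and only j with a valid index j-1 can continue)
def pvWalk (code : List (Int × String)) : Nat → Int → List String
  | 0, _ => []
  | fuel + 1, j =>
    if j = 0 then []
    else
      match PySem.List.pyGet? code (j - 1) with
      | none => []
      | some c => c.2 :: pvWalk code fuel c.1

def LZ78_decode_alt (code : List (Int × String)) : List String :=
  (List.range code.length).map
    (fun (i : Nat) => String.join (pvWalk code (2 * code.length + 2) ((i : Int) + 1)).reverse)

-- ===== PRECONDITION & SPEC =====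
-- Pre_ excludes exactly the inputs where A raises KeyError: some pair's back-reference is negative or points past the entries defined so far.
def Pre_LZ78_decode (code : List (Int × String)) : Prop :=
  ∀ (k : Nat), (h : k < code.length) → 0 ≤ (code[k]).1 ∧ (code[k]).1 ≤ (k : Int)
instance (code : List (Int × String)) : Decidable (Pre_LZ78_decode code) := by unfold Pre_LZ78_decode; infer_instance

def pvWitness_LZ78_decode : (List (Int × String)) := [(0, "a"), (1, "b"), (0, "c"), (2, "d")]

def Spec_LZ78_decode (code : List (Int × String)) (out : List String) : Prop := out = LZ78_decode_alt code
instance (code : List (Int × String)) (out : List String) : Decidable (Spec_LZ78_decode code out) := by unfold Spec_LZ78_decode; infer_instance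

-- ===== CLAIM (what is proved, stated in full; the proofs are below) =====
def Claim_equal_LZ78_decode : Prop := ∀ (code : List (Int × String)), Dom_LZ78_decode code → Pre_LZ78_decode code → Spec_LZ78_decode code (LZ78_decode code)

-- ===== LEMMAS AND PROOFS =====

-- reference decoding of entry j (entry 0 is the empty root); 'min' only caps the recursion, under Pre_ it is the parent itself
def pvDecRef (code : List (Int × String)) : Nat → String
  | 0 => ""
  | j + 1 =>
    match code[j]? with
    | none => ""
    | some c => pvDecRef code (min c.1.toNat j) ++ c.2
decreasing_by omega

lemma pvDecRef_zero (code : List (Int × String)) : pvDecRef code 0 = "" := by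
  simp [pvDecRef]

lemma pvDecRef_succ (code : List (Int × String)) (j : Nat) (h : j < code.length) :
    pvDecRef code (j + 1) = pvDecRef code (min (code[j]).1.toNat j) ++ (code[j]).2 := by
  conv_lhs => rw [pvDecRef.eq_def]
  simp [List.getElem?_eq_getElem h]

lemma join_append_single (l : List String) (s : String) :
    String.join (l ++ [s]) = String.join l ++ s := by
  simp [String.join, List.foldl_append]

lemma walk_join (code : List (Int × String)) (hpre : Pre_LZ78_decode code) :
    ∀ (fuel j : Nat), j ≤ fuel → j ≤ code.length →
      String.join (pvWalk code fuel (j : Int)).reverse = pvDecRef code j := by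
  intro fuel
  induction fuel with
  | zero =>
    intro j hj _
    interval_cases j
    simp [pvWalk, String.join, pvDecRef_zero]
  | succ fuel ih =>
    intro j hj hlen
    cases j with
    | zero => simp [pvWalk, String.join, pvDecRef_zero]
    | succ m =>
      have hm : m < code.length := hlen
      have hget : PySem.List.pyGet? code ((m + 1 : Nat) - 1 : Int) = some code[m] := by
        have : ((m + 1 : Nat) : Int) - 1 = (m : Nat) := by push_cast; ring
        rw [this, PySem.List.pyGet?_natCast, List.getElem?_eq_getElem hm]
      obtain ⟨hge, hle⟩ := hpre m hm
      have hcast : (code[m]).1 = (((code[m]).1.toNat : Nat) : Int) := by omega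
      have hmin : min (code[m]).1.toNat m = (code[m]).1.toNat := by omega
      rw [pvWalk]
      simp only [Nat.cast_add, Nat.cast_one]
      rw [if_neg (by omega)]
      have : ((m : Int) + 1) - 1 = ((m + 1 : Nat) : Int) - 1 := by push_cast; ring
      rw [this, hget]
      rw [List.reverse_cons, join_append_single]
      rw [hcast, ih (code[m]).1.toNat (by omega) (by omega)]
      rw [pvDecRef_succ code m hm, hmin]

lemma alt_eq_map (code : List (Int × String)) (hpre : Pre_LZ78_decode code) :
    LZ78_decode_alt code = (List.range code.length).map (fun i => pvDecRef code (i + 1)) := by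
  unfold LZ78_decode_alt
  apply List.map_congr_left
  intro i hi
  rw [List.mem_range] at hi
  have : ((i : Int) + 1) = ((i + 1 : Nat) : Int) := by push_cast; ring
  rw [this, walk_join code hpre (2 * code.length + 2) (i + 1) (by omega) (by omega)]

lemma foldl_inv (code : List (Int × String)) (hpre : Pre_LZ78_decode code) :
    ∀ (n k : Nat) (d : PySem.Dict Int String) (acc : List String),
      code.length = k + n →
      (∀ j : Nat, 1 ≤ j → j ≤ k → d.get? (j : Int) = some (pvDecRef code j)) →
      ((PySem.List.enumerate (code.drop k) (k : Int)).foldl pvStepA (d, acc)).2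
        = acc ++ (List.range' (k + 1) n).map (pvDecRef code) := by
  intro n
  induction n with
  | zero =>
    intro k d acc hlen _
    have : code.drop k = [] := List.drop_eq_nil_of_le (by omega)
    simp [this]
  | succ n ih =>
    intro k d acc hlen hd
    have hk : k < code.length := by omega
    have hdrop : code.drop k = code[k] :: code.drop (k + 1) := List.drop_eq_getElem_cons hk
    rw [hdrop, PySem.List.enumerate_cons, List.foldl_cons]
    obtain ⟨hge, hle⟩ := hpre k hk
    have hstep : pvStepA (d, acc) ((k : Int), code[k])
        = (d.insert ((k : Int) + 1) (pvDecRef code (k + 1)), acc ++ [pvDecRef code (k + 1)]) := by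
      unfold pvStepA
      by_cases h0 : (code[k]).1 = 0
      · rw [if_pos h0]
        have : pvDecRef code (k + 1) = (code[k]).2 := by
          rw [pvDecRef_succ code k hk, h0]
          simp [pvDecRef_zero]
        rw [this]
      · rw [if_neg h0]
        have h1 : 1 ≤ (code[k]).1.toNat := by omega
        have hcast : (((code[k]).1.toNat : Nat) : Int) = (code[k]).1 := by omega
        have hget : d.get? (code[k]).1 = some (pvDecRef code (code[k]).1.toNat) := by
          rw [← hcast]; exact hd _ h1 (by omega)
        have hmin : min (code[k]).1.toNat k = (code[k]).1.toNat := by omega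
        have : pvDecRef code (k + 1) = (d.get? (code[k]).1).getD "" ++ (code[k]).2 := by
          rw [pvDecRef_succ code k hk, hmin, hget]; rfl
        rw [this]
    rw [hstep]
    have hcast1 : ((k : Int) + 1) = ((k + 1 : Nat) : Int) := by push_cast; ring
    rw [hcast1]
    have := ih (k + 1) (d.insert ((k + 1 : Nat) : Int) (pvDecRef code (k + 1)))
      (acc ++ [pvDecRef code (k + 1)]) (by omega) ?_
    · rw [this, List.range'_succ]
      simp
    · intro j h1 h2
      by_cases hj : j = k + 1
      · subst hj
        rw [PySem.Dict.get?_insert_self]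
      · have hne : ((j : Nat) : Int) ≠ ((k + 1 : Nat) : Int) := by
          intro h; apply hj; exact_mod_cast h
        rw [PySem.Dict.get?_insert_of_ne _ _ hne]
        exact hd j h1 (by omega)

lemma a_eq_map (code : List (Int × String)) (hpre : Pre_LZ78_decode code) :
    LZ78_decode code = (List.range code.length).map (fun i => pvDecRef code (i + 1)) := by
  unfold LZ78_decode
  have := foldl_inv code hpre code.length 0 (PySem.Dict.mk []) [] (by omega) (by omega)
  simp only [List.drop_zero, Nat.cast_zero] at this
  rw [this, List.nil_append, List.range'_eq_map_range, List.map_map]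
  apply List.map_congr_left
  intro a _
  simp [Nat.add_comm]

-- ===== VERDICT (by name: the statement is the Claim_ definition above) =====
theorem LZ78_decode_spec : Claim_equal_LZ78_decode := by
  intro code _ hpre
  unfold Spec_LZ78_decode
  rw [a_eq_map code hpre, alt_eq_map code hpre]
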